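-- pv_equiv track=rewrite | github.com/Qintsg/SSPU-all-in-one | scripts/release/render_release_notes.py | collect_sections
-- ===== SOURCE A (Python) =====
-- from typing import Dict, List
--
-- def collect_sections(markdown_text: str) -> Dict[str, List[str]]:
--     """
--     从 markdown 中提取二级标题章节
--     :param markdown_text: 原始 markdown 文本
--     :return: 以二级标题为键、正文行为值的章节映射
--     """
--     sections: Dict[str, List[str]] = {}
--     current_title: str | None = None
--
--     for line in markdown_text.splitlines():
--         if line.startswith("## "):
--             current_title = line[3:].strip()
--             sections.setdefault(current_title, [])
--             continue
--
--         if current_title is not None: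
--             sections[current_title].append(line.rstrip())
--
--     return sections
-- ===== SOURCE B (Python) =====
-- def collect_sections(markdown_text):
--     """Block-scan re-implementation: find each '## ' header, scan forward to the
--     next header, and attach the whole body slice at once (instead of A's
--     line-by-line stateful pass)."""
--     lines = markdown_text.splitlines()
--     n = len(lines)
--     sections = {}
--     i = 0
--     while i < n and not lines[i].startswith("## "):
--         i += 1
--     while i < n:
--         title = lines[i][3:].strip()
--         j = i + 1
--         while j < n and not lines[j].startswith("## "):
--             j += 1
--         sections.setdefault(title, [])
--         sections[title].extend(line.rstrip() for line in lines[i + 1:j])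
--         i = j
--     return sections
-- ===== Notes on version B (the rewrite author's own statement) =====
-- stated objective: alternative
-- what changed: Replaces A's single stateful pass (current_title carried across every line, one dict append per body line) by a block scan: skip the preamble, then for each H2 header line scan forward to the next header and attach the whole rstripped body slice to the title in one extend.
import Mathlib
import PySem

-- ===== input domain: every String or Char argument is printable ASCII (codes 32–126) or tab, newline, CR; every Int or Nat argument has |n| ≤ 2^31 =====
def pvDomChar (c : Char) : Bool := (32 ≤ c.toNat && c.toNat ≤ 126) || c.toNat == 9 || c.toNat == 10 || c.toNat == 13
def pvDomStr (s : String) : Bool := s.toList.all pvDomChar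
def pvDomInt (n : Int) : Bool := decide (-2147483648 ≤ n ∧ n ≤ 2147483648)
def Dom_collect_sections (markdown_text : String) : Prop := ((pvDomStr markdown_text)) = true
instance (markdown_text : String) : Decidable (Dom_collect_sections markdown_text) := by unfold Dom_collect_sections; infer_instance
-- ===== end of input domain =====

-- B is a block-scan (two-pointer) re-implementation of A's stateful line-by-line pass;
-- equal return value on every input (the dict is returned as its items list).

-- ===== PORT A =====
-- one iteration of A's for-loop: state = (sections, current_title)
def csStep (st : PySem.Dict String (List String) × Option String) (line : String) :
    PySem.Dict String (List String) × Option String :=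
  if PySem.Str.startswith line "## " then
    let t := PySem.Str.strip (PySem.Str.slice line (some 3) none)
    (st.1.setdefault t [], some t)
  else
    match st.2 with
    -- sections[current_title].append(line.rstrip()); the key is always present here
    -- (setdefault ran when current_title was set), so modify with default [] is exact
    | some t => (st.1.modify t [] (fun v => v ++ [PySem.Str.rstrip line]), some t)
    | none => st

def collect_sections (markdown_text : String) : List (String × List String) :=
  (((PySem.Str.splitlines markdown_text).foldl csStep (PySem.Dict.empty, none)).1).items

-- ===== PORT B =====
-- B's outer while-loop: lines starts at a header (or is empty); the inner while-scan
-- to the next header is the takeWhile/dropWhile split of the remaining lines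
def csGo : PySem.Dict String (List String) → List String → PySem.Dict String (List String)
  | d, [] => d
  | d, l :: ls =>
    let t := PySem.Str.strip (PySem.Str.slice l (some 3) none)
    let body := ls.takeWhile (fun x => !(PySem.Str.startswith x "## "))
    let rest := ls.dropWhile (fun x => !(PySem.Str.startswith x "## "))
    csGo ((d.setdefault t []).modify t [] (fun v => v ++ body.map PySem.Str.rstrip)) rest
termination_by _ lines => lines.length
decreasing_by
  exact Nat.lt_succ_of_le (List.length_dropWhile_le _ _)

def collect_sections_alt (markdown_text : String) : List (String × List String) :=
  let lines := PySem.Str.splitlines markdown_text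
  -- B's first while-loop: skip the preamble before the first header
  (csGo PySem.Dict.empty (lines.dropWhile (fun x => !(PySem.Str.startswith x "## ")))).items

-- ===== PRECONDITION & SPEC =====
def Spec_collect_sections (markdown_text : String) (out : List (String × List String)) : Prop := out = collect_sections_alt markdown_text
instance (markdown_text : String) (out : List (String × List String)) : Decidable (Spec_collect_sections markdown_text out) := by unfold Spec_collect_sections; infer_instance

-- ===== CLAIM (what is proved, stated in full; the proofs are below) =====
def Claim_equal_collect_sections : Prop := ∀ (markdown_text : String), Dom_collect_sections markdown_text → Spec_collect_sections markdown_text (collect_sections markdown_text)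

-- ===== LEMMAS AND PROOFS =====

-- contains = false means the key is not among the keys
theorem csNotMemKeys (d : PySem.Dict String (List String)) (k : String)
    (h : d.contains k = false) : k ∉ d.keys := by
  simp only [PySem.Dict.contains, PySem.Dict.keys, List.any_eq_false] at h ⊢
  intro hk
  rcases List.mem_map.mp hk with ⟨p, hp, hpk⟩
  have := h p hp
  simp [hpk] at this

-- setdefault preserves Nodup keys
theorem csNodupSetdefault (d : PySem.Dict String (List String)) (k : String) (v : List String)
    (hn : d.keys.Nodup) : (d.setdefault k v).keys.Nodup := by
  rw [PySem.Dict.keys_setdefault]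
  by_cases h : d.contains k = true
  · simp [h, hn]
  · have h' : d.contains k = false := by simpa using h
    have hm := csNotMemKeys d k h'
    simp only [h']
    simp [List.nodup_append, hn]
    intro a ha hak
    exact hm (hak ▸ ha)

-- re-inserting the value a key already holds is the identity (needs Nodup keys)
theorem csInsertGetDSelf (d : PySem.Dict String (List String)) (k : String)
    (h : d.contains k = true) (hn : d.keys.Nodup) : d.insert k (d.getD k []) = d := by
  apply PySem.Dict.ext
  simp only [PySem.Dict.insert, h, if_pos]
  have hex : ∃ x ∈ d.items, ((fun p : String × List String => p.1 == k) x) = true := by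
    simp only [PySem.Dict.contains, List.any_eq_true] at h
    exact h
  have hs : (d.items.find? (fun p => p.1 == k)).isSome := List.find?_isSome.mpr hex
  obtain ⟨q, hq⟩ := Option.isSome_iff_exists.mp hs
  have hqmem : q ∈ d.items := List.mem_of_find?_eq_some hq
  have hqk : q.1 = k := by have := List.find?_some hq; simpa using this
  have hval : d.getD k [] = q.2 := by
    simp [PySem.Dict.getD, PySem.Dict.get?, hq]
  conv_rhs => rw [← List.map_id d.items]
  apply List.map_congr_left
  intro p hp
  by_cases hpk : p.1 = k
  · have hpq : p = q := by
      have hinj := List.inj_on_of_nodup_map (f := Prod.fst) (l := d.items) hn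
      exact hinj hp hqmem (by rw [hpk, hqk])
    subst hpq
    rw [if_pos (by simp [hpk]), hval, ← hpk]
    rfl
  · simp [hpk]

-- two successive appends to the same key fuse
theorem csModifyAppend (d : PySem.Dict String (List String)) (k : String) (u v : List String) :
    (d.modify k [] (fun w => w ++ u)).modify k [] (fun w => w ++ v)
      = d.modify k [] (fun w => w ++ (u ++ v)) := by
  simp [PySem.Dict.modify, PySem.Dict.getD_insert_self, PySem.Dict.insert_insert_self,
    List.append_assoc]

-- appending nothing to a present key is the identity
theorem csModifyNil (d : PySem.Dict String (List String)) (k : String)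
    (h : d.contains k = true) (hn : d.keys.Nodup) : d.modify k [] (fun w => w) = d :=
  csInsertGetDSelf d k h hn

-- A's loop absorbs a header-free body into one append to the current title
theorem csFoldBody (body : List String) :
    ∀ (rest : List String) (d : PySem.Dict String (List String)) (t : String),
    (∀ x ∈ body, PySem.Str.startswith x "## " = false) →
    d.contains t = true → d.keys.Nodup →
    (body ++ rest).foldl csStep (d, some t)
      = rest.foldl csStep (d.modify t [] (fun w => w ++ body.map PySem.Str.rstrip), some t) := by
  induction body with
  | nil =>
      intro rest d t _ hc hn
      simp only [List.nil_append, List.map_nil, List.append_nil]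
      rw [csModifyNil d t hc hn]
  | cons l body' ih =>
      intro rest d t hb hc hn
      have hl : PySem.Str.startswith l "## " = false := hb l (List.mem_cons_self ..)
      have hlc := hl; simp at hlc
      have step : csStep (d, some t) l
          = (d.modify t [] (fun w => w ++ [PySem.Str.rstrip l]), some t) := by
        simp [csStep, hlc]
      calc (l :: body' ++ rest).foldl csStep (d, some t)
          = (body' ++ rest).foldl csStep (d.modify t [] (fun w => w ++ [PySem.Str.rstrip l]), some t) := by
            simp [List.foldl_cons, step]
        _ = rest.foldl csStep ((d.modify t [] (fun w => w ++ [PySem.Str.rstrip l])).modify t []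
              (fun w => w ++ body'.map PySem.Str.rstrip), some t) := by
            apply ih rest _ t (fun x hx => hb x (List.mem_cons_of_mem _ hx))
            · simp [PySem.Dict.contains_modify]
            · exact PySem.Dict.nodup_keys_insert _ _ _ hn
        _ = rest.foldl csStep (d.modify t [] (fun w => w ++ (l :: body').map PySem.Str.rstrip), some t) := by
            rw [csModifyAppend]; simp

-- once the next line is a header, the current title is irrelevant
theorem csCurIrrel (h : String) (tl : List String) (d : PySem.Dict String (List String)) (t : String)
    (hh : PySem.Str.startswith h "## " = true) :
    (h :: tl).foldl csStep (d, some t) = (h :: tl).foldl csStep (d, none) := by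
  have hhc := hh; simp at hhc
  simp [List.foldl_cons, csStep, hhc]

theorem csHeadDropWhileFalse {α : Type} (p : α → Bool) :
    ∀ (l : List α) (x : α) (xs : List α), l.dropWhile p = x :: xs → p x = false := by
  intro l
  induction l with
  | nil => intro x xs h; simp at h
  | cons a as ih =>
      intro x xs h
      by_cases hp : p a = true
      · rw [List.dropWhile_cons_of_pos hp] at h; exact ih x xs h
      · have hp' : p a = false := by simpa using hp
        rw [List.dropWhile_cons_of_neg (by simp [hp'])] at h
        cases h; exact hp'

-- main invariant: A's fold from (d, none) equals B's block scan after skipping the preamble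
theorem csMain : ∀ (n : ℕ) (lines : List String) (d : PySem.Dict String (List String)),
    lines.length ≤ n → d.keys.Nodup →
    (lines.foldl csStep (d, none)).1
      = csGo d (lines.dropWhile (fun x => !(PySem.Str.startswith x "## "))) := by
  intro n
  induction n with
  | zero =>
      intro lines d hlen _
      have : lines = [] := List.eq_nil_of_length_eq_zero (Nat.le_zero.mp hlen)
      subst this; simp [csGo]
  | succ n ih =>
      intro lines d hlen hn
      cases lines with
      | nil => simp [csGo]
      | cons l ls =>
        by_cases hl : PySem.Str.startswith l "## " = true
        · -- header line: absorb its body, then recurse on the rest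
          have hlc := hl; simp at hlc
          set t := PySem.Str.strip (PySem.Str.slice l (some 3) none) with ht
          set p : String → Bool := fun x => !(PySem.Str.startswith x "## ") with hp
          set body := ls.takeWhile p with hbody
          set rest := ls.dropWhile p with hrest
          have hsplit : body ++ rest = ls := List.takeWhile_append_dropWhile
          have hstep : csStep (d, none) l = (d.setdefault t [], some t) := by
            simp [csStep, hlc, ht]
          have hbmem : ∀ x ∈ body, PySem.Str.startswith x "## " = false := by
            intro x hx
            have := List.mem_takeWhile_imp (l := ls) (p := p) (hbody ▸ hx)
            simpa [hp] using this
          have hc : (d.setdefault t []).contains t = true := by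
            simp [PySem.Dict.contains_setdefault]
          have hnd : (d.setdefault t []).keys.Nodup := csNodupSetdefault d t [] hn
          set d' := (d.setdefault t []).modify t [] (fun w => w ++ body.map PySem.Str.rstrip)
            with hd'
          have habs : (ls.foldl csStep (d.setdefault t [], some t))
              = rest.foldl csStep (d', some t) := by
            rw [← hsplit]; exact csFoldBody body rest _ t hbmem hc hnd
          have hnd' : d'.keys.Nodup := PySem.Dict.nodup_keys_insert _ _ _ hnd
          have hdrop : (l :: ls).dropWhile p = l :: ls :=
            List.dropWhile_cons_of_neg (by simp [hp, hlc])
          have hgo : csGo d (l :: ls) = csGo d' rest := by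
            rw [csGo]
          rw [hdrop, hgo]
          have hrestlen : rest.length ≤ n := by
            have h1 : rest.length ≤ ls.length := by rw [hrest]; exact List.length_dropWhile_le _ _
            have h2 : ls.length ≤ n := by simpa using Nat.le_of_succ_le_succ hlen
            omega
          cases hr : rest with
          | nil =>
              rw [List.foldl_cons, hstep, habs, hr]
              simp [csGo]
          | cons h2 tl =>
              have hh2 : PySem.Str.startswith h2 "## " = true := by
                have := csHeadDropWhileFalse p ls h2 tl (by rw [← hrest, hr])
                simpa [hp] using this
              have hh2c := hh2; simp at hh2c
              have hdrop2 : rest.dropWhile p = rest := by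
                rw [hr]; exact List.dropWhile_cons_of_neg (by simp [hp, hh2c])
              rw [List.foldl_cons, hstep, habs, hr, csCurIrrel h2 tl d' t hh2]
              have := ih (h2 :: tl) d' (by rw [← hr]; exact hrestlen) hnd'
              rw [this, ← hr, hdrop2]
        · -- non-header line before any title: A ignores it, B's dropWhile skips it
          have hl' : PySem.Str.startswith l "## " = false := by simpa using hl
          have hlc := hl'; simp at hlc
          have hstep : csStep (d, none) l = (d, none) := by simp [csStep, hlc]
          have hdrop : (l :: ls).dropWhile (fun x => !(PySem.Str.startswith x "## "))
              = ls.dropWhile (fun x => !(PySem.Str.startswith x "## ")) :=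
            List.dropWhile_cons_of_pos (by simp [hlc])
          rw [List.foldl_cons, hstep, hdrop]
          exact ih ls d (by simpa using Nat.le_of_succ_le_succ hlen) hn

-- ===== VERDICT (by name: the statement is the Claim_ definition above) =====
theorem collect_sections_spec : Claim_equal_collect_sections := by
  intro markdown_text _
  unfold Spec_collect_sections collect_sections collect_sections_alt
  have := csMain (PySem.Str.splitlines markdown_text).length
    (PySem.Str.splitlines markdown_text) PySem.Dict.empty (le_refl _)
    (by simp [PySem.Dict.empty, PySem.Dict.keys])
  rw [this]
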